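-- pv_equiv track=rewrite | github.com/DanishjeetSingh/d321_data_representation | assignments/danishjeetSinghAssignment1.py | equalSetHT
-- ===== SOURCE A (Python) =====
-- class HashTable:
--
--     def __init__(self, p):
--         # Initialize the Hash Table with a given size (p)
--         self.p = p
--         self.table = [[] for _ in range(p)]
--
--     def _hash(self, key):
--         # Calculate the hash value of a given key using modulo operator
--         return key % self.p
--
--     def isIn(self, key):
--         # Check whether the given key is present in the Hash Table or not
--         for k, v in self.table[self._hash(key)]:
--             if k == key:
--                 return True
--         return False
--
--     def insert(self, key):
--         # Insert a new key-value pair into the Hash Table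
--         hashcode = self._hash(key)
--         if self.isIn(key):
--             self.getValue(key) + 1
--         self.table[hashcode].append((key, 1))
--
--     def delete(self, key):
--         # Delete a key-value pair from the Hash Table
--         if self.isIn(key):
--             hashcode = self._hash(key)
--             for i, (k, v) in enumerate(self.table[hashcode]):
--                 if k == key:
--                     self.table[hashcode].pop(i)
--             return True
--         return False
--
--     def set_item(self, key, val):
--         h = self._hash(key)
--         found = False
--         #set the value of key
--         for i, j in enumerate(self.table[h]):
--             if len(j) == 2 and j[0] == key:
--                 self.table[h][i] = (key,val)
--                 found = True
--         if not found:
--             self.table[h].append((key,val))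
--
--     def insert_list(self, lst):
--         # insert a list of elements in the Hash Table
--         for i in lst:
--             if not self.isIn(i):
--                 self.set_item(i, 1)
--             else:
--                 self.set_item(i, self.getValue(i) + 1)
--
--     def getValue(self, key: int, default: int = None):
--         # get value of a specific key
--         if self.isIn(key):
--             hashcode = key % self.p
--             for (k, v) in self.table[hashcode]:
--                 if k == key:
--                     return v
--         if default is None:
--             raise KeyError("Key absent from the Hash Table")
--         else:
--             return default
--
-- def equalSetHT(A,B):
--     t = HashTable(4) # Initialize a HashTable with size 4
--     for i, j in enumerate(A):
--         t.set_item(j, i)  # Insert elements of A into the HashTable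
--
--     for num in B:
--         if not t.delete(num):  # If element is not present in HashTable, return False
--             return False
--
--     return True  # If all elements are present in the HashTable, return True
-- ===== SOURCE B (Python) =====
-- def equalSetHT(A, B):
--     setA = set(A)
--     setB = set(B)
--     return len(B) == len(setB) and setB <= setA
-- ===== Notes on version B (the rewrite author's own statement) =====
-- stated objective: faster
-- what changed: Replaces the 4-bucket hash-table build and element-by-element delete-with-early-exit loop by a direct set-algebra check: B is accepted iff it has no duplicates (len(B) == len(set(B))) and set(B) is a subset of set(A).
import Mathlib
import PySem

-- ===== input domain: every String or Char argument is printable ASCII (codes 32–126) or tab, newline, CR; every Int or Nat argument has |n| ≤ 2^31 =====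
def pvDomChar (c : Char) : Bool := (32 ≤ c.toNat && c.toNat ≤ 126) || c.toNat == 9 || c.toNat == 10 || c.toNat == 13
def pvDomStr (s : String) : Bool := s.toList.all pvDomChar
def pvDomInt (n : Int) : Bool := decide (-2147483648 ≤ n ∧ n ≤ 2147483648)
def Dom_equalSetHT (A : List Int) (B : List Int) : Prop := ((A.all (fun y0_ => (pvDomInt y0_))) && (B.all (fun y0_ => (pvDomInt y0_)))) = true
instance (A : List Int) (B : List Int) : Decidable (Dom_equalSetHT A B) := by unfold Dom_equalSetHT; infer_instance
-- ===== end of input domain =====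

-- B replaces A's 4-bucket hash-table build and sequential delete loop (quadratic: 4 fixed
-- buckets) by a direct set-algebra check (no duplicates in B and set(B) ⊆ set(A)); objective: faster.


-- ===== PORT A =====
-- The HashTable is its `table` field: a list of 4 buckets of (key, value) pairs (p = 4).
-- self._hash(key) = key % self.p
def pvHash (key : Int) : Int := PySem.Int.mod key 4

-- the `for k, v in bucket: if k == key: return True` loop of isIn
def pvIsInAux (key : Int) : List (Int × Int) → Bool
  | [] => false
  | (k, _) :: rest => if k = key then true else pvIsInAux key rest

-- isIn; the bucket index key % 4 is exactly in [0, 4) = range of the table,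
-- so `.toNat`-indexing with default [] is exact for self.table[self._hash(key)].
def pvIsIn (t : List (List (Int × Int))) (key : Int) : Bool :=
  pvIsInAux key (t.getD (pvHash key).toNat [])

-- set_item's replace loop over enumerate(bucket): returns (updated bucket, found).
-- (len(j) == 2 is always true for the (key, value) pairs this table stores.)
def pvSetItemAux (key val : Int) : List (Int × Int) → List (Int × Int) × Bool
  | [] => ([], false)
  | (k, v) :: rest =>
    let r := pvSetItemAux key val rest
    if k = key then ((key, val) :: r.1, true) else ((k, v) :: r.1, r.2)

def pvSetItem (t : List (List (Int × Int))) (key val : Int) : List (List (Int × Int)) :=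
  let h := (pvHash key).toNat
  let r := pvSetItemAux key val (t.getD h [])
  t.set h (if r.2 then r.1 else r.1 ++ [(key, val)])

-- delete's `for i, (k, v) in enumerate(bucket): if k == key: bucket.pop(i)`:
-- the live iterator keeps advancing over the mutated list, exactly as modelled here.
def pvPopLoop (key : Int) (i : Nat) (lst : List (Int × Int)) : List (Int × Int) :=
  if h : i < lst.length then
    if lst[i].1 = key then pvPopLoop key (i + 1) (lst.eraseIdx i)
    else pvPopLoop key (i + 1) lst
  else lst
termination_by lst.length - i
decreasing_by
  · rw [List.length_eraseIdx_of_lt h]; omega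
  · omega

def pvDelete (t : List (List (Int × Int))) (key : Int) : Bool × List (List (Int × Int)) :=
  if pvIsIn t key then
    let h := (pvHash key).toNat
    (true, t.set h (pvPopLoop key 0 (t.getD h [])))
  else (false, t)

-- `for i, j in enumerate(A): t.set_item(j, i)`
def pvInsertLoop (t : List (List (Int × Int))) (i : Int) : List Int → List (List (Int × Int))
  | [] => t
  | j :: rest => pvInsertLoop (pvSetItem t j i) (i + 1) rest

-- `for num in B: if not t.delete(num): return False` then `return True`
def pvBLoop (t : List (List (Int × Int))) : List Int → Bool
  | [] => true
  | num :: rest =>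
    let r := pvDelete t num
    if r.1 then pvBLoop r.2 rest else false

def equalSetHT (A : List Int) (B : List Int) : Bool :=
  pvBLoop (pvInsertLoop (List.replicate 4 []) 0 A) B

-- ===== PORT B =====
def equalSetHT_alt (A : List Int) (B : List Int) : Bool :=
  let setA : PySem.Set Int := PySem.Set.ofList A
  let setB : PySem.Set Int := PySem.Set.ofList B
  ((B.length : Int) == PySem.Set.len setB) && PySem.Set.issubset setB setA

-- ===== PRECONDITION & SPEC =====
def Spec_equalSetHT (A : List Int) (B : List Int) (out : Bool) : Prop := out = equalSetHT_alt A B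
instance (A : List Int) (B : List Int) (out : Bool) : Decidable (Spec_equalSetHT A B out) := by unfold Spec_equalSetHT; infer_instance

-- ===== CLAIM (what is proved, stated in full; the proofs are below) =====
def Claim_equal_equalSetHT : Prop := ∀ (A : List Int) (B : List Int), Dom_equalSetHT A B → Spec_equalSetHT A B (equalSetHT A B)

-- ===== LEMMAS AND PROOFS =====

lemma pvHash_toNat_lt (k : Int) : (pvHash k).toNat < 4 := by
  have h1 := PySem.Int.mod_nonneg k (b := 4) (by norm_num)
  have h2 := PySem.Int.mod_lt k (b := 4) (by norm_num)
  unfold pvHash; omega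

lemma pv_getD_set_eq (l : List (List (Int × Int))) (n i : Nat) (v : List (Int × Int))
    (hn : n < l.length) :
    (l.set n v).getD i [] = if i = n then v else l.getD i [] := by
  simp only [List.getD, List.getElem?_set]
  by_cases h : n = i
  · subst h; simp [hn]
  · have h' : ¬ i = n := fun hh => h hh.symm
    simp [h, h']

lemma pv_getD_replicate_nil (i : Nat) :
    (List.replicate 4 ([] : List (Int × Int))).getD i [] = [] := by
  simp only [List.getD, List.getElem?_replicate]
  split <;> rfl

-- the table together with its abstract key set S (a predicate)
def pvRep (t : List (List (Int × Int))) (S : Int → Prop) : Prop :=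
  t.length = 4 ∧
  (∀ i < 4, (∀ p ∈ t.getD i [], (pvHash p.1).toNat = i) ∧ ((t.getD i []).map Prod.fst).Nodup) ∧
  (∀ x, S x ↔ x ∈ (t.getD (pvHash x).toNat []).map Prod.fst)

lemma pvRep_congr {t : List (List (Int × Int))} {S S' : Int → Prop}
    (h : pvRep t S) (hSS : ∀ x, S x ↔ S' x) : pvRep t S' :=
  ⟨h.1, h.2.1, fun x => (hSS x).symm.trans (h.2.2 x)⟩

lemma pvRep_init : pvRep (List.replicate 4 []) (fun _ => False) := by
  refine ⟨rfl, ?_, ?_⟩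
  · intro i hi
    rw [pv_getD_replicate_nil]
    simp
  · intro x
    rw [pv_getD_replicate_nil]
    simp

lemma pvIsInAux_iff (key : Int) (b : List (Int × Int)) :
    pvIsInAux key b = true ↔ key ∈ b.map Prod.fst := by
  induction b with
  | nil => simp [pvIsInAux]
  | cons p rest ih =>
    obtain ⟨k, v⟩ := p
    simp only [pvIsInAux, List.map_cons, List.mem_cons]
    split_ifs with hk
    · simp [hk]
    · have hk' : ¬ key = k := fun h => hk h.symm
      rw [ih]; simp [hk']

lemma pvIsIn_iff {t : List (List (Int × Int))} {S : Int → Prop} (h : pvRep t S) (x : Int) :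
    pvIsIn t x = true ↔ S x := by
  unfold pvIsIn
  rw [pvIsInAux_iff, ← h.2.2 x]

lemma pvSetItemAux_map_fst (key val : Int) (b : List (Int × Int)) :
    (pvSetItemAux key val b).1.map Prod.fst = b.map Prod.fst := by
  induction b with
  | nil => rfl
  | cons p rest ih =>
    obtain ⟨k, v⟩ := p
    by_cases hk : k = key <;> simp [pvSetItemAux, hk, ih]

lemma pvSetItemAux_found (key val : Int) (b : List (Int × Int)) :
    (pvSetItemAux key val b).2 = true ↔ key ∈ b.map Prod.fst := by
  induction b with
  | nil => simp [pvSetItemAux]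
  | cons p rest ih =>
    obtain ⟨k, v⟩ := p
    simp only [pvSetItemAux, List.map_cons, List.mem_cons]
    split_ifs with hk
    · simp [hk]
    · have hk' : ¬ key = k := fun h => hk h.symm
      rw [ih]; simp [hk']

lemma map_fst_filter_ne (num : Int) (b : List (Int × Int)) :
    (b.filter (fun p => !(p.1 == num))).map Prod.fst
      = (b.map Prod.fst).filter (fun k => !(k == num)) := by
  induction b with
  | nil => rfl
  | cons p rest ih =>
    obtain ⟨k, v⟩ := p
    by_cases hk : k = num <;> simp [List.filter_cons, hk, ih]

lemma pvSetItem_rep {t : List (List (Int × Int))} {S : Int → Prop} (h : pvRep t S)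
    (key val : Int) : pvRep (pvSetItem t key val) (fun x => S x ∨ x = key) := by
  obtain ⟨hlen, hbk, hmem⟩ := h
  have hklt : (pvHash key).toNat < 4 := pvHash_toNat_lt key
  set hk := (pvHash key).toNat with hhk
  set b := t.getD hk [] with hb
  set r := pvSetItemAux key val b with hr
  set bNew := (if r.2 then r.1 else r.1 ++ [(key, val)]) with hbNew
  have hps : pvSetItem t key val = t.set hk bNew := rfl
  have hgetD : ∀ i, (pvSetItem t key val).getD i [] = if i = hk then bNew else t.getD i [] := by
    intro i
    rw [hps, pv_getD_set_eq t hk i bNew (by omega)]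
  -- keys of the new bucket
  have hkeys : bNew.map Prod.fst = if key ∈ b.map Prod.fst then b.map Prod.fst
      else b.map Prod.fst ++ [key] := by
    by_cases hf : r.2 = true
    · rw [hbNew, if_pos hf, hr, pvSetItemAux_map_fst,
        if_pos ((pvSetItemAux_found key val b).mp (hr ▸ hf))]
    · have hnot : ¬ key ∈ b.map Prod.fst := fun hmem' =>
        hf (hr ▸ (pvSetItemAux_found key val b).mpr hmem')
      rw [hbNew, if_neg hf, hr, if_neg hnot]
      simp [pvSetItemAux_map_fst]
  refine ⟨by rw [hps]; simp [hlen], ?_, ?_⟩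
  · intro i hi
    rw [hgetD i]
    by_cases hi' : i = hk
    · subst hi'
      rw [if_pos rfl]
      constructor
      · intro p hp
        have hpf : p.1 ∈ bNew.map Prod.fst := List.mem_map_of_mem hp
        rw [hkeys] at hpf
        have hin : p.1 ∈ b.map Prod.fst ∨ p.1 = key := by
          by_cases hcase : key ∈ b.map Prod.fst
          · rw [if_pos hcase] at hpf; exact Or.inl hpf
          · rw [if_neg hcase] at hpf
            rcases List.mem_append.mp hpf with hold | hnew
            · exact Or.inl hold
            · simp at hnew; exact Or.inr hnew
        rcases hin with hold | hnew
        · obtain ⟨q, hq, hq1⟩ := List.mem_map.mp hold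
          rw [← hq1]; exact (hbk hk hklt).1 q hq
        · rw [hnew]
      · rw [hkeys]
        by_cases hcase : key ∈ b.map Prod.fst
        · rw [if_pos hcase]; exact (hbk hk hklt).2
        · rw [if_neg hcase]
          refine List.Nodup.append (hbk hk hklt).2 (List.nodup_singleton key) ?_
          intro a ha hb
          simp only [List.mem_singleton] at hb
          exact hcase (hb ▸ ha)
    · rw [if_neg hi']; exact hbk i hi
  · intro x
    rw [hgetD (pvHash x).toNat]
    by_cases hx : (pvHash x).toNat = hk
    · rw [if_pos hx, hkeys]
      have hxb : S x ↔ x ∈ b.map Prod.fst := by rw [hmem x, hb, hx]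
      by_cases hcase : key ∈ b.map Prod.fst
      · rw [if_pos hcase]
        constructor
        · rintro (hs | hxk)
          · exact hxb.mp hs
          · rwa [hxk]
        · intro hmem'; exact Or.inl (hxb.mpr hmem')
      · rw [if_neg hcase]
        simp only [List.mem_append, List.mem_singleton]
        exact or_congr hxb Iff.rfl
    · rw [if_neg hx]
      have hxk : x ≠ key := fun hxy => hx (by rw [hxy])
      rw [← hmem x]
      simp [hxk]

lemma pvPopLoop_no_match (key : Int) :
    ∀ (n i : Nat) (lst : List (Int × Int)), lst.length - i ≤ n →
    (∀ p ∈ lst.drop i, p.1 ≠ key) → pvPopLoop key i lst = lst := by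
  intro n
  induction n with
  | zero =>
    intro i lst hn _
    rw [pvPopLoop]
    have : ¬ i < lst.length := by omega
    simp [this]
  | succ n ih =>
    intro i lst hn hno
    rw [pvPopLoop]
    by_cases hi : i < lst.length
    · have hmem : lst[i] ∈ lst.drop i := by
        have h0 : 0 < (lst.drop i).length := by simp; omega
        have he : (lst.drop i)[0] = lst[i] := by simp [List.getElem_drop]
        rw [← he]; exact List.getElem_mem h0
      have hne : lst[i].1 ≠ key := hno _ hmem
      simp only [dif_pos hi, if_neg hne]
      refine ih (i + 1) lst (by omega) (fun p hp => hno p ?_)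
      have hsub : lst.drop (i + 1) ⊆ lst.drop i := by
        rw [← List.drop_drop (j := i) (i := 1)]
        exact List.drop_subset _ _
      exact hsub hp
    · simp [hi]

lemma pvPopLoop_spec (key : Int) :
    ∀ (n i : Nat) (lst : List (Int × Int)), lst.length - i ≤ n →
    ((lst.drop i).map Prod.fst).Nodup →
    pvPopLoop key i lst = lst.take i ++ (lst.drop i).filter (fun p => !(p.1 == key)) := by
  intro n
  induction n with
  | zero =>
    intro i lst hn _
    have hge : ¬ i < lst.length := by omega
    rw [pvPopLoop]
    simp only [dif_neg hge]
    rw [List.take_of_length_le (by omega), List.drop_of_length_le (by omega)]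
    simp
  | succ n ih =>
    intro i lst hn hnd
    rw [pvPopLoop]
    by_cases hi : i < lst.length
    · simp only [dif_pos hi]
      have hdrop : lst.drop i = lst[i] :: lst.drop (i + 1) :=
        (List.getElem_cons_drop hi).symm
      by_cases hk : lst[i].1 = key
      · simp only [if_pos hk]
        -- all later keys differ from key (Nodup of the dropped suffix)
        have hrest : ∀ p ∈ lst.drop (i + 1), p.1 ≠ key := by
          rw [hdrop] at hnd
          simp only [List.map_cons, List.nodup_cons] at hnd
          intro p hp hpk
          have h1 : p.1 ∈ (lst.drop (i + 1)).map Prod.fst := List.mem_map_of_mem hp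
          rw [hpk, ← hk] at h1
          exact hnd.1 h1
        have herase : lst.eraseIdx i = lst.take i ++ lst.drop (i + 1) :=
          List.eraseIdx_eq_take_drop_succ lst i
        have hdrop' : (lst.eraseIdx i).drop i = lst.drop (i + 1) := by
          rw [herase, List.drop_append_of_le_length (by simp; omega)]
          simp [Nat.min_eq_left (by omega : i ≤ lst.length)]
        have hsub2 : (lst.eraseIdx i).drop (i + 1) ⊆ lst.drop (i + 1) := by
          intro a ha
          have hdd : (lst.eraseIdx i).drop (i + 1) = ((lst.eraseIdx i).drop i).drop 1 := by
            rw [List.drop_drop]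
          rw [hdd, hdrop'] at ha
          exact List.drop_subset _ _ ha
        have hstop := pvPopLoop_no_match key (lst.eraseIdx i).length (i + 1) (lst.eraseIdx i)
          (by omega) (fun p hp => hrest p (hsub2 hp))
        rw [hstop, herase]
        congr 1
        rw [hdrop]
        simp only [List.filter_cons]
        rw [if_neg (by simp [hk])]
        rw [List.filter_eq_self.mpr (fun p hp => by simp [hrest p hp])]
      · simp only [if_neg hk]
        have hnd' : ((lst.drop (i + 1)).map Prod.fst).Nodup := by
          rw [hdrop] at hnd
          simp only [List.map_cons, List.nodup_cons] at hnd
          exact hnd.2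
        rw [ih (i + 1) lst (by omega) hnd', hdrop, List.filter_cons]
        have hkeep : (!(lst[i].1 == key)) = true := by simp [hk]
        rw [hkeep, List.take_add_one, List.getElem?_eq_getElem hi]
        simp only [Option.toList_some, List.append_assoc, List.singleton_append, if_true]
    · simp only [dif_neg hi]
      rw [List.take_of_length_le (by omega), List.drop_of_length_le (by omega)]
      simp

lemma pvDelete_pos {t : List (List (Int × Int))} {S : Int → Prop} (h : pvRep t S)
    {num : Int} (hnum : S num) :
    (pvDelete t num).1 = true ∧ pvRep (pvDelete t num).2 (fun x => S x ∧ x ≠ num) := by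
  obtain ⟨hlen, hbk, hmem⟩ := h
  have hin : pvIsIn t num = true := (pvIsIn_iff ⟨hlen, hbk, hmem⟩ num).mpr hnum
  have hklt : (pvHash num).toNat < 4 := pvHash_toNat_lt num
  set hk := (pvHash num).toNat with hhk
  set b := t.getD hk [] with hb
  have hbnd : (b.map Prod.fst).Nodup := (hbk hk hklt).2
  have hpop : pvPopLoop num 0 b = b.filter (fun p => !(p.1 == num)) := by
    have := pvPopLoop_spec num b.length 0 b (by omega) (by simpa using hbnd)
    simpa using this
  have hdel : pvDelete t num = (true, t.set hk (pvPopLoop num 0 b)) := by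
    unfold pvDelete
    rw [hin]
    rfl
  rw [hdel]
  refine ⟨rfl, by simp [hlen], ?_, ?_⟩
  · intro i hi
    rw [pv_getD_set_eq t hk i _ (by omega)]
    by_cases hi' : i = hk
    · subst hi'
      rw [if_pos rfl, hpop]
      constructor
      · intro p hp
        have hpb : p ∈ b := List.mem_of_mem_filter hp
        exact (hbk hk hklt).1 p hpb
      · rw [map_fst_filter_ne]
        exact List.Nodup.filter _ hbnd
    · rw [if_neg hi']
      exact hbk i hi
  · intro x
    rw [pv_getD_set_eq t hk _ _ (by omega)]
    by_cases hx : (pvHash x).toNat = hk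
    · rw [if_pos hx, hpop, map_fst_filter_ne, List.mem_filter]
      have hxb : S x ↔ x ∈ b.map Prod.fst := by rw [hmem x, hb, ← hx]
      constructor
      · rintro ⟨hs, hne⟩
        exact ⟨hxb.mp hs, by simpa using hne⟩
      · rintro ⟨hmem', hne⟩
        exact ⟨hxb.mpr hmem', by simpa using hne⟩
    · rw [if_neg hx]
      have hxn : x ≠ num := fun hxy => hx (by rw [hxy])
      rw [← hmem x]
      simp [hxn]

lemma pvDelete_neg {t : List (List (Int × Int))} {S : Int → Prop} (h : pvRep t S)
    {num : Int} (hnum : ¬ S num) : pvDelete t num = (false, t) := by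
  have hin : pvIsIn t num = false := by
    cases hi : pvIsIn t num
    · rfl
    · exact absurd ((pvIsIn_iff h num).mp hi) hnum
  unfold pvDelete
  rw [hin]
  simp

lemma pvInsertLoop_rep :
    ∀ (L : List Int) (t : List (List (Int × Int))) (S : Int → Prop) (i : Int),
    pvRep t S → pvRep (pvInsertLoop t i L) (fun x => S x ∨ x ∈ L) := by
  intro L
  induction L with
  | nil => intro t S i h; exact pvRep_congr h (by simp)
  | cons j rest ih =>
    intro t S i h
    have h1 := pvSetItem_rep h j i
    have h2 := ih (pvSetItem t j i) _ (i + 1) h1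
    exact pvRep_congr h2 (by intro x; simp; tauto)

lemma pvBLoop_iff :
    ∀ (B : List Int) (t : List (List (Int × Int))) (S : Int → Prop), pvRep t S →
    (pvBLoop t B = true ↔ B.Nodup ∧ ∀ x ∈ B, S x) := by
  intro B
  induction B with
  | nil => intro t S _; simp [pvBLoop]
  | cons num rest ih =>
    intro t S h
    by_cases hnum : S num
    · obtain ⟨hfst, hrep⟩ := pvDelete_pos h hnum
      have hrec := ih (pvDelete t num).2 _ hrep
      simp only [pvBLoop, hfst, if_pos]
      rw [hrec]
      simp only [List.nodup_cons, List.mem_cons, forall_eq_or_imp]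
      constructor
      · rintro ⟨hnd, hall⟩
        exact ⟨⟨fun hc => (hall num hc).2 rfl, hnd⟩, hnum, fun x hx => (hall x hx).1⟩
      · rintro ⟨⟨hnin, hnd⟩, _, hall⟩
        exact ⟨hnd, fun x hx => ⟨hall x hx, fun hxe => hnin (hxe ▸ hx)⟩⟩
    · rw [pvBLoop, pvDelete_neg h hnum]
      simp [hnum]

lemma equalSetHT_iff (A B : List Int) :
    equalSetHT A B = true ↔ B.Nodup ∧ ∀ x ∈ B, x ∈ A := by
  unfold equalSetHT
  have h0 := pvInsertLoop_rep A (List.replicate 4 []) (fun _ => False) 0 pvRep_init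
  have h1 := pvRep_congr h0 (S' := fun x => x ∈ A) (by simp)
  exact pvBLoop_iff B _ _ h1

-- B-side facts about PySem.Set.ofList = List.foldl Set.add []
lemma foldl_add_eq_append_of_nodup :
    ∀ (xs : List Int) (s : PySem.Set Int), xs.Nodup → (∀ x ∈ xs, x ∉ s) →
    List.foldl PySem.Set.add s xs = s ++ xs := by
  intro xs
  induction xs with
  | nil => simp
  | cons x rest ih =>
    intro s hnd hdis
    simp only [List.foldl_cons]
    have hxs : x ∉ s := hdis x (by simp)
    have hadd : PySem.Set.add s x = s ++ [x] := by
      unfold PySem.Set.add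
      rw [if_neg (by simpa [PySem.Set.contains_iff] using hxs)]
    rw [hadd, ih (s ++ [x]) (List.nodup_cons.mp hnd).2 ?_]
    · simp
    · intro y hy
      simp only [List.mem_append, List.mem_singleton]
      rintro (hys | hyx)
      · exact hdis y (by simp [hy]) hys
      · exact (List.nodup_cons.mp hnd).1 (hyx ▸ hy)

lemma length_foldl_add_le :
    ∀ (xs : List Int) (s : PySem.Set Int),
    (List.foldl PySem.Set.add s xs).length ≤ s.length + xs.length := by
  intro xs
  induction xs with
  | nil => simp
  | cons x rest ih =>
    intro s
    simp only [List.foldl_cons, List.length_cons]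
    have hle : (PySem.Set.add s x).length ≤ s.length + 1 := by
      unfold PySem.Set.add
      split <;> simp
    calc (List.foldl PySem.Set.add (s.add x) rest).length
        ≤ (s.add x).length + rest.length := ih _
      _ ≤ s.length + (rest.length + 1) := by omega

lemma length_foldl_add_lt :
    ∀ (xs : List Int) (s : PySem.Set Int), (¬ xs.Nodup ∨ ∃ x ∈ xs, x ∈ s) →
    (List.foldl PySem.Set.add s xs).length < s.length + xs.length := by
  intro xs
  induction xs with
  | nil =>
    rintro s (hnd | ⟨x, hx, _⟩)
    · exact absurd List.nodup_nil hnd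
    · simp at hx
  | cons x rest ih =>
    rintro s hyp
    simp only [List.foldl_cons, List.length_cons]
    by_cases hxs : x ∈ s
    · have hadd : PySem.Set.add s x = s := by
        unfold PySem.Set.add
        rw [if_pos (by simpa [PySem.Set.contains_iff] using hxs)]
      rw [hadd]
      have := length_foldl_add_le rest s
      omega
    · have hadd : PySem.Set.add s x = s ++ [x] := by
        unfold PySem.Set.add
        rw [if_neg (by simpa [PySem.Set.contains_iff] using hxs)]
      rw [hadd]
      have hyp' : ¬ rest.Nodup ∨ ∃ y ∈ rest, y ∈ s ++ [x] := by
        rcases hyp with hnd | ⟨y, hy, hys⟩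
        · rw [List.nodup_cons] at hnd
          push_neg at hnd
          by_cases hxr : x ∈ rest
          · exact Or.inr ⟨x, hxr, by simp⟩
          · exact Or.inl (hnd hxr)
        · rcases List.mem_cons.mp hy with hyx | hyr
          · exact absurd (hyx ▸ hys) hxs
          · exact Or.inr ⟨y, hyr, by simp [hys]⟩
      have := ih (s ++ [x]) hyp'
      simp only [List.length_append, List.length_singleton] at this
      omega

lemma ofList_length_iff_nodup (B : List Int) :
    (PySem.Set.ofList B).length = B.length ↔ B.Nodup := by
  constructor
  · intro hlen
    by_contra hnd
    have hlt := length_foldl_add_lt B [] (Or.inl hnd)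
    rw [PySem.Set.ofList_eq_foldl] at hlen
    simp at hlt
    omega
  · intro hnd
    rw [PySem.Set.ofList_eq_foldl,
      foldl_add_eq_append_of_nodup B [] hnd (by simp)]
    simp

lemma equalSetHT_alt_iff (A B : List Int) :
    equalSetHT_alt A B = true ↔ B.Nodup ∧ ∀ x ∈ B, x ∈ A := by
  unfold equalSetHT_alt
  simp only [Bool.and_eq_true, beq_iff_eq, PySem.Set.issubset_iff]
  have hlen0 : PySem.Set.len (PySem.Set.ofList B) = ((PySem.Set.ofList B).length : Int) := rfl
  rw [hlen0]
  constructor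
  · rintro ⟨hlen, hsub⟩
    have hlen' : (PySem.Set.ofList B).length = B.length := by exact_mod_cast hlen.symm
    refine ⟨(ofList_length_iff_nodup B).mp hlen', fun x hx => ?_⟩
    exact (PySem.Set.mem_ofList A x).mp (hsub x ((PySem.Set.mem_ofList B x).mpr hx))
  · rintro ⟨hnd, hall⟩
    refine ⟨?_, fun x hx => (PySem.Set.mem_ofList A x).mpr
      (hall x ((PySem.Set.mem_ofList B x).mp hx))⟩
    have := (ofList_length_iff_nodup B).mpr hnd
    exact_mod_cast this.symm

-- ===== VERDICT (by name: the statement is the Claim_ definition above) =====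
theorem equalSetHT_spec : Claim_equal_equalSetHT := by
  intro A B _
  unfold Spec_equalSetHT
  rw [Bool.eq_iff_iff, equalSetHT_iff, equalSetHT_alt_iff]
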